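-- pv_equiv track=rewrite | github.com/ASHWarriors/Daddy-Long-Legs | Money.py | overheadfunc
-- ===== SOURCE A (Python) =====
-- def overheadfunc(money,alist):
--     #cdata=child_data()
--     res=[]
--     tot=0
--     for t in alist:
--         if t[3] !=0:
--             tot+=t[3]
--             if tot<= money:
--                 res.append(t[0])            #EXCEPTIONAL HANDLING 1:
--                                        #WHAT IF MONEY LEFT IN BUDGET STILL? INFORM USER
--             else:
--                 break
--         else:
--             pass
--     return res
-- ===== SOURCE B (Python) =====
-- def _accum(start, items):
--     # prefix sums of t[3], paired with t[0]
--     out = []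
--     s = start
--     for t in items:
--         s = s + t[3]
--         out.append((t[0], s))
--     return out
--
-- def overheadfunc(money, alist):
--     pairs = _accum(0, [t for t in alist if t[3] != 0])
--     k = 0
--     while k < len(pairs) and pairs[k][1] <= money:
--         k += 1
--     return [tid for tid, _ in pairs[:k]]
-- ===== Notes on version B (the rewrite author's own statement) =====
-- stated objective: alternative
-- what changed: Replaces A's single stateful loop with break by two passes: filter nonzero rows and build (id, prefix-sum) pairs, then truncate at the first prefix exceeding money and project the ids.
import Mathlib
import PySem

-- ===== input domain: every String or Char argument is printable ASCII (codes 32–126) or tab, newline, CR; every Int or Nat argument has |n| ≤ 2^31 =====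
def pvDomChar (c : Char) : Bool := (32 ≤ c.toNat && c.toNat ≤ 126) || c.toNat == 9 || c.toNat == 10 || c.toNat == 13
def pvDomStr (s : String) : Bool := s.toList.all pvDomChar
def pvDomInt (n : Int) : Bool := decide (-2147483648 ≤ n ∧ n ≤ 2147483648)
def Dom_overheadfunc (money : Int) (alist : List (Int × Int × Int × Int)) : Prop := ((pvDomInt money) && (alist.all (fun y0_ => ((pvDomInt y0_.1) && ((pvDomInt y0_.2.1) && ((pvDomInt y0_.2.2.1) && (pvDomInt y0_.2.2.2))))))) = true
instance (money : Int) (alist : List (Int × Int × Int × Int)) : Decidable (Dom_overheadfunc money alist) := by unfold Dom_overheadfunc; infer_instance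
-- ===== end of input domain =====

-- ===== PORT A =====
-- B builds the nonzero rows' prefix sums first, then truncates; same values, different decomposition.
def pvALoop (money : Int) (tot : Int) : List (Int × Int × Int × Int) → List Int
  | [] => []
  | t :: rest =>
    if t.2.2.2 ≠ 0 then
      if tot + t.2.2.2 ≤ money then t.1 :: pvALoop money (tot + t.2.2.2) rest
      else []
    else pvALoop money tot rest

def overheadfunc (money : Int) (alist : List (Int × Int × Int × Int)) : List Int :=
  pvALoop money 0 alist

-- ===== PORT B =====
def pvAccum (s : Int) : List (Int × Int × Int × Int) → List (Int × Int)
  | [] => []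
  | t :: rest => (t.1, s + t.2.2.2) :: pvAccum (s + t.2.2.2) rest

def overheadfunc_alt (money : Int) (alist : List (Int × Int × Int × Int)) : List Int :=
  ((pvAccum 0 (alist.filter (fun t => t.2.2.2 ≠ 0))).takeWhile (fun p => p.2 ≤ money)).map Prod.fst

-- ===== PRECONDITION & SPEC =====
def Spec_overheadfunc (money : Int) (alist : List (Int × Int × Int × Int)) (out : List Int) : Prop := out = overheadfunc_alt money alist
instance (money : Int) (alist : List (Int × Int × Int × Int)) (out : List Int) : Decidable (Spec_overheadfunc money alist out) := by unfold Spec_overheadfunc; infer_instance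

-- ===== CLAIM (what is proved, stated in full; the proofs are below) =====
def Claim_equal_overheadfunc : Prop := ∀ (money : Int) (alist : List (Int × Int × Int × Int)), Dom_overheadfunc money alist → Spec_overheadfunc money alist (overheadfunc money alist)

-- ===== LEMMAS AND PROOFS =====

-- ===== VERDICT (by name: the statement is the Claim_ definition above) =====
theorem pv_loop_eq (money : Int) (alist : List (Int × Int × Int × Int)) (tot : Int) :
    pvALoop money tot alist =
      ((pvAccum tot (alist.filter (fun t => t.2.2.2 ≠ 0))).takeWhile
        (fun p => p.2 ≤ money)).map Prod.fst := by
  induction alist generalizing tot with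
  | nil => simp [pvALoop, pvAccum]
  | cons t rest ih =>
    by_cases h : t.2.2.2 = 0
    · simp [pvALoop, List.filter_cons, h, ih]
    · simp only [pvALoop, if_neg (by simpa using h : ¬ t.2.2.2 = 0), List.filter_cons, h,
        if_pos h] 
      by_cases hle : tot + t.2.2.2 ≤ money
      · simp [h, pvAccum, hle, ih]
      · simp [h, pvAccum, hle]

theorem overheadfunc_spec : Claim_equal_overheadfunc := by
  intro money alist _
  unfold Spec_overheadfunc overheadfunc overheadfunc_alt
  exact pv_loop_eq money alist 0
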